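-- pv_equiv track=rewrite | github.com/comaraDOTcom/Silly_Name_Generator | silly_name_generator/pmb_au_francais.py | pmb_dict
-- ===== SOURCE A (Python) =====
-- import string
-- from collections import defaultdict
--
-- def pmb_dict(letter_list):
--     # use the alphabet to make all the keys, letters on the alphabet.
--     alphabet = string.ascii_lowercase
--     letter_count = defaultdict(list)
--     for letter in alphabet:
--         # makes a key for every letter in alphabet
--         letter_count[letter]
--     for letter in letter_list:
--         letter_count[letter].append(letter)
--     return letter_count
-- ===== SOURCE B (Python) =====
-- import string
-- from collections import defaultdict, Counter
--
-- def pmb_dict(letter_list):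
--     cnt = Counter(letter_list)
--     alpha = set(string.ascii_lowercase)
--     keys = list(string.ascii_lowercase) + [k for k in cnt if k not in alpha]
--     return defaultdict(list, {l: [l] * cnt[l] for l in keys})
-- ===== Notes on version B (the rewrite author's own statement) =====
-- stated objective: alternative
-- what changed: A buckets by appending into a primed defaultdict in one mutating pass; B counts occurrences with Counter, computes the key order up front (alphabet then first occurrences of other strings) and builds each bucket by replicating its key count times in a dict comprehension.
import Mathlib
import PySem

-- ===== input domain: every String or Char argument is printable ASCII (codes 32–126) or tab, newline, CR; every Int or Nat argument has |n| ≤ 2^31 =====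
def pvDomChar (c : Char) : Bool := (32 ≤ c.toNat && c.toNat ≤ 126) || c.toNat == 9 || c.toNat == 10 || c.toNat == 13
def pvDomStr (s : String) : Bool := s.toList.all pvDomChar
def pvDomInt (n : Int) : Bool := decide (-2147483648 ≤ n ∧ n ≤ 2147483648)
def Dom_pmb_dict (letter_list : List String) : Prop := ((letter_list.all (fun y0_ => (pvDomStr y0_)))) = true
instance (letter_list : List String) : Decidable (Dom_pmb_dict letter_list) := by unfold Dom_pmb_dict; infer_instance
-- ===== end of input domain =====

-- B counts occurrences once (Counter), computes the key order up front, and builds each bucket by replication, instead of A's mutating defaultdict bucketing pass.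
-- The equivalence is about the RETURN value as an association list (both Pythons return a defaultdict(list)).

-- string.ascii_lowercase, as the list of its one-character strings (both versions iterate it key by key)
def pvAlph : List String :=
  ["a","b","c","d","e","f","g","h","i","j","k","l","m",
   "n","o","p","q","r","s","t","u","v","w","x","y","z"]

-- ===== PORT A =====
def pmb_dict (letter_list : List String) : List (String × List String) :=
  -- letter_count = defaultdict(list); for letter in alphabet: letter_count[letter]
  let d0 : PySem.Dict String (List String) :=
    pvAlph.foldl (fun d l => d.modify l [] (fun v => v)) PySem.Dict.empty
  -- for letter in letter_list: letter_count[letter].append(letter)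
  let d1 := letter_list.foldl (fun d l => d.modify l [] (fun v => v ++ [l])) d0
  d1.items

-- ===== PORT B =====
def pmb_dict_alt (letter_list : List String) : List (String × List String) :=
  -- cnt = Counter(letter_list)
  let cnt := PySem.Dict.counter letter_list
  -- keys = list(ascii_lowercase) + [k for k in cnt if k not in alpha]
  let keys := pvAlph ++ cnt.keys.filter (fun k => !(PySem.Set.contains pvAlph k))
  -- {l: [l] * cnt[l] for l in keys}
  keys.map (fun l => (l, List.replicate (cnt.getD l 0).toNat l))

-- ===== PRECONDITION & SPEC =====
def Spec_pmb_dict (letter_list : List String) (out : List (String × List String)) : Prop := out = pmb_dict_alt letter_list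
instance (letter_list : List String) (out : List (String × List String)) : Decidable (Spec_pmb_dict letter_list out) := by unfold Spec_pmb_dict; infer_instance

-- ===== CLAIM (what is proved, stated in full; the proofs are below) =====
def Claim_equal_pmb_dict : Prop := ∀ (letter_list : List String), Dom_pmb_dict letter_list → Spec_pmb_dict letter_list (pmb_dict letter_list)

-- ===== LEMMAS AND PROOFS =====

-- the alphabet-priming fold: every bucket of d0 is []
lemma getD_prime (L : List String) (d : PySem.Dict String (List String)) (c : String) :
    (L.foldl (fun d l => d.modify l [] (fun v => v)) d).getD c [] = d.getD c [] := by
  induction L generalizing d with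
  | nil => rfl
  | cons h t ih =>
      simp only [List.foldl_cons, ih, PySem.Dict.getD_modify]
      split
      · next h' => rw [h']
      · rfl

lemma d0_keys : (pvAlph.foldl (fun d l => d.modify l [] (fun v => v))
    (PySem.Dict.empty : PySem.Dict String (List String))).keys = pvAlph := by decide

lemma d0_nodup : (pvAlph.foldl (fun d l => d.modify l [] (fun v => v))
    (PySem.Dict.empty : PySem.Dict String (List String))).keys.Nodup := by decide

theorem pmb_dict_spec : Claim_equal_pmb_dict := by
  intro xs _
  show pmb_dict xs = pmb_dict_alt xs
  unfold pmb_dict pmb_dict_alt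
  set d0 : PySem.Dict String (List String) :=
    pvAlph.foldl (fun d l => d.modify l [] (fun v => v)) PySem.Dict.empty with hd0
  set d1 := xs.foldl (fun d l => d.modify l [] (fun v => v ++ [l])) d0 with hd1
  have hnd : d1.keys.Nodup := by
    rw [hd1]
    exact PySem.Dict.nodup_keys_foldl_modify_key xs id [] (fun d l v => v ++ [l]) d0 d0_nodup
  have hkeys : d1.keys = PySem.Set.update pvAlph xs := by
    rw [hd1]
    have := PySem.Dict.keys_foldl_modify_key (l := xs) (key := id)
      (d0 := ([] : List String)) (f := fun d l v => v ++ [l]) (d := d0)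
    simpa [d0_keys] using this
  have hget : ∀ c, d1.getD c [] = xs.filter (fun x => x == c) := by
    intro c
    have hpairs : d1 = (xs.map (fun x => (x, x))).foldl
        (fun d p => d.modify p.1 [] (fun v => v ++ [p.2])) d0 := by
      rw [hd1, List.foldl_map]
    rw [hpairs, PySem.Dict.getD_foldl_modify_append, getD_prime]
    simp [List.filter_map, Function.comp_def]
  rw [PySem.Dict.items_eq_map_keys d1 hnd [], hkeys,
      PySem.Set.update_eq_append_filter]
  dsimp only
  rw [PySem.Dict.keys_counter]
  simp only [List.map_append]
  congr 1 <;>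
  · apply List.map_congr_left
    intro l _
    simp [hget l, PySem.Dict.getD_counter, List.filter_beq]
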